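-- pv_equiv track=rewrite | github.com/aquastripe/problem-solving | codeforces/1992 Div3/D.py | solve
-- ===== SOURCE A (Python) =====
-- def solve(n, m, k, a):
--     dp = [0] * (n + 1)
--     dist_jump = min(n + 1, m)
--     reachable = [True] * dist_jump + [False] * (n + 1 - dist_jump)
--     for i in range(dist_jump):
--         dp[i] = k
--
--     for i in range(n):
--         if not reachable[i]:
--             continue
--
--         if a[i] == 'W':
--             if dp[i] > 0:
--                 dp[i + 1] = max(dp[i + 1], dp[i] - 1)
--                 reachable[i + 1] = True
--         elif a[i] == 'C':
--             ...
--         else: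
--             for j in range(m):
--                 if i + 1 + j <= n:
--                     reachable[i + 1 + j] = True
--                     dp[i + 1 + j] = max(dp[i + 1 + j], dp[i])
--
--     if reachable[n]:
--         return 'YES'
--
--     return 'NO'
-- ===== SOURCE B (Python) =====
-- def solve(n, m, k, a):
--     # pull-based dp: dp[i] = best remaining swim budget on reaching metre i, or None
--     dp = []
--     for i in range(n + 1):
--         best = k if i < m else None
--         for j in range(max(0, i - m), i):
--             if dp[j] is not None and a[j] != 'W' and a[j] != 'C':
--                 if best is None or dp[j] > best:
--                     best = dp[j]
--         if i > 0 and a[i - 1] == 'W' and dp[i - 1] is not None and dp[i - 1] > 0: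
--             if best is None or dp[i - 1] - 1 > best:
--                 best = dp[i - 1] - 1
--         dp.append(best)
--     return 'YES' if dp[n] is not None else 'NO'
-- ===== Notes on version B (the rewrite author's own statement) =====
-- stated objective: alternative
-- what changed: Replaces A's push-style relaxation (mutating dp/reachable arrays ahead of the scan, with a separate init loop and an inner loop over jump targets) by a pull-style dp built append-only: each cell's Option value is computed once from the previous m cells (jump sources scanned backward-window, plus a swim step), no reachable array; Pre_ excludes negative n and strings shorter than n, where A raises IndexError on most inputs or returns 'NO' only by accident of its pre-marked reachable array while B's uniform window scan raises.
-- outside the precondition, e.g. on solve(2, 0, 0, ''): A returns 'NO', B raises IndexError; on solve(-1, -1, 0, ''): A returns 'NO', B raises IndexError; on solve(2, 1, 0, 'C'): A returns 'NO', B raises IndexError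
import Mathlib
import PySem

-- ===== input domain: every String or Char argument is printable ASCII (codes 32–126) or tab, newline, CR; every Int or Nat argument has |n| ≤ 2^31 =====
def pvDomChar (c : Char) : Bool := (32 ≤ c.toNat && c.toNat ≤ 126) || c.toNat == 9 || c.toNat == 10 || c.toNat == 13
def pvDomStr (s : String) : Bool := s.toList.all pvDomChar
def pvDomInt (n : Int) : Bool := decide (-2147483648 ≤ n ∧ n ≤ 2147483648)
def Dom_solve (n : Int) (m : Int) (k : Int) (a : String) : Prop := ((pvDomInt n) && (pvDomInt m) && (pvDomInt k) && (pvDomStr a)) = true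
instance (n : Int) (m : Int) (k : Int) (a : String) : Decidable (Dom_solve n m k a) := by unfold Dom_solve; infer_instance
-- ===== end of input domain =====

-- B replaces A's push-style dp relaxation (mutable dp/reachable arrays written ahead of the scan)
-- by a pull-style dp built append-only, each cell computed once from the previous m cells; return
-- values agree on Pre_ (0 ≤ n and len(a) ≥ n, the inputs where Python A returns without IndexError).


-- ===== PORT A =====
-- the main-loop body of A; list reads use getD with a default that is never hit inside Pre_
-- (Python indexes dp[i], reachable[i], a[i] in range there)
def solveStep (n m : Int) (L : List Char) (s : List Int × List Bool) (i : Nat) : List Int × List Bool :=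
  if s.2.getD i false = false then s
  else if L.getD i ' ' = 'W' then
    (if s.1.getD i 0 > 0 then
      (s.1.set (i+1) (max (s.1.getD (i+1) 0) (s.1.getD i 0 - 1)), s.2.set (i+1) true)
     else s)
  else if L.getD i ' ' = 'C' then s
  else
    (List.range m.toNat).foldl (fun (s' : List Int × List Bool) (j : Nat) =>
      if (i:Int) + 1 + (j:Int) ≤ n then
        (s'.1.set (i+1+j) (max (s'.1.getD (i+1+j) 0) (s'.1.getD i 0)), s'.2.set (i+1+j) true)
      else s') s

def solve (n m k : Int) (a : String) : String :=
  let distJump : Int := min (n+1) m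
  let dp0 : List Int := List.replicate (n+1).toNat 0
  let reach0 : List Bool := List.replicate distJump.toNat true ++ List.replicate ((n+1) - distJump).toNat false
  let dp1 : List Int := (List.range distJump.toNat).foldl (fun d i => d.set i k) dp0
  let s := (List.range n.toNat).foldl (solveStep n m a.toList) (dp1, reach0)
  if s.2.getD n.toNat false then "YES" else "NO"

-- ===== PORT B =====
-- one cell of B's pull dp: best budget reaching metre i, from jump sources in the last m cells
-- and a possible swim step from i-1 (Source B's loop body, step for step)
def cellB (m k : Int) (L : List Char) (dp : List (Option Int)) (i : Nat) : Option Int :=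
  let best0 : Option Int := if (i:Int) < m then some k else none
  let best1 : Option Int := (PySem.List.pyRange (max 0 ((i:Int) - m)) (i:Int) 1).foldl (fun best j =>
    match dp.getD j.toNat none with
    | none => best
    | some v =>
      if L.getD j.toNat ' ' ≠ 'W' ∧ L.getD j.toNat ' ' ≠ 'C' then
        match best with
        | none => some v
        | some b => if v > b then some v else some b
      else best) best0
  if 0 < i then
    if L.getD (i-1) ' ' = 'W' then
      match dp.getD (i-1) none with
      | some v => if v > 0 then
          (match best1 with
          | none => some (v-1)
          | some b => if v - 1 > b then some (v-1) else some b)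
        else best1
      | none => best1
    else best1
  else best1

def solve_alt (n m k : Int) (a : String) : String :=
  let dp := (List.range (n+1).toNat).foldl (fun dp i => dp ++ [cellB m k a.toList dp i]) ([] : List (Option Int))
  if (dp.getD n.toNat none).isSome then "YES" else "NO"

-- ===== PRECONDITION & SPEC =====
-- Pre_ excludes negative n and strings shorter than n: there Python A raises IndexError on most
-- inputs, or returns 'NO' only by accident of its pre-marked reachable array (negative-index /
-- never-scanned cases) while B's uniform window scan raises.
def Pre_solve (n : Int) (m : Int) (k : Int) (a : String) : Prop :=
  0 ≤ n ∧ n ≤ (a.toList.length : Int)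
instance (n : Int) (m : Int) (k : Int) (a : String) : Decidable (Pre_solve n m k a) := by
  unfold Pre_solve; infer_instance

def pvWitness_solve : Int × Int × Int × String := (3, 2, 1, "WLW")

def Spec_solve (n : Int) (m : Int) (k : Int) (a : String) (out : String) : Prop := out = solve_alt n m k a
instance (n : Int) (m : Int) (k : Int) (a : String) (out : String) : Decidable (Spec_solve n m k a out) := by
  unfold Spec_solve; infer_instance

-- ===== CLAIM (what is proved, stated in full; the proofs are below) =====
def Claim_equal_solve : Prop := ∀ (n : Int) (m : Int) (k : Int) (a : String), Dom_solve n m k a → Pre_solve n m k a → Spec_solve n m k a (solve n m k a)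

-- ===== LEMMAS AND PROOFS =====

-- B-side spec machinery: the dp list B builds, and the value of its t-th cell
def bdp (m k : Int) (L : List Char) : Nat → List (Option Int)
  | 0 => []
  | t+1 => bdp m k L t ++ [cellB m k L (bdp m k L t) t]

def gB (m k : Int) (L : List Char) (t : Nat) : Option Int := cellB m k L (bdp m k L t) t

-- candidate combinators shared by the two normal forms
def omaxI (b : Option Int) (v : Int) : Option Int :=
  match b with | none => some v | some b' => some (max b' v)
def stepO (b : Option Int) (o : Option Int) : Option Int :=
  match o with | none => b | some v => omaxI b v
def stepM (x : Int) (o : Option Int) : Int :=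
  match o with | none => x | some v => max x v

def logB (L : List Char) (j : Nat) : Bool := !(L.getD j ' ' == 'W') && !(L.getD j ' ' == 'C')
def clampA (m : Int) (j : Nat) (w : Int) : Int := if (j:Int) < m then w else max w 0

-- jump-source candidate as B's window sees it
def FBc (m k : Int) (L : List Char) (j : Nat) : Option Int :=
  match gB m k L j with
  | none => none
  | some w => if logB L j then some w else none

-- A-side spec: contribution of loop iteration j to cell p (values are A's clamped dp values)
def contrib (n m k : Int) (L : List Char) (j p : Nat) : Option Int :=
  match gB m k L j with
  | none => none
  | some w =>
    if logB L j then
      (if j < p ∧ (p:Int) ≤ (j:Int) + m ∧ (p:Int) ≤ n then some (clampA m j w) else none)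
    else if L.getD j ' ' = 'W' then
      (if p = j+1 ∧ clampA m j w > 0 then some (clampA m j w - 1) else none)
    else none

def ainit (n m k : Int) (p : Nat) : Int := if (p:Int) < min (n+1) m then k else 0

def clist (n m k : Int) (L : List Char) (t p : Nat) : List Int :=
  (List.range t).filterMap (fun j => contrib n m k L j p)

def dpPart (n m k : Int) (L : List Char) (t p : Nat) : Int :=
  (clist n m k L t p).foldl max (ainit n m k p)

def rchPart (n m k : Int) (L : List Char) (t p : Nat) : Bool :=
  decide ((p:Int) < min (n+1) m) || (List.range t).any (fun j => (contrib n m k L j p).isSome)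

-- the two invariant relations between B's running Option best and A's running max
def RelC (b : Option Int) (x : Int) : Prop :=
  match b with | none => x = 0 | some v => x = max v 0
def RelE (b : Option Int) (x : Int) : Prop := b = some x

-- ---- basic list lemmas ----
theorem bdp_length (m k : Int) (L : List Char) (t : Nat) : (bdp m k L t).length = t := by
  induction t with
  | zero => rfl
  | succ t ih => simp [bdp, ih]

theorem bdp_getD (m k : Int) (L : List Char) {j t : Nat} (h : j < t) :
    (bdp m k L t).getD j none = gB m k L j := by
  induction t with
  | zero => omega
  | succ t ih =>
    rcases Nat.lt_or_ge j t with h' | h'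
    · rw [bdp, List.getD_append _ _ _ _ (by rw [bdp_length]; exact h'), ih h']
    · have hj : j = t := by omega
      subst hj
      rw [bdp]
      have hl : (bdp m k L j).length = j := bdp_length m k L j
      simp [List.getD_eq_getElem?_getD, hl, gB]

theorem bfold_eq (m k : Int) (L : List Char) (T : Nat) :
    (List.range T).foldl (fun dp i => dp ++ [cellB m k L dp i]) ([] : List (Option Int)) = bdp m k L T := by
  induction T with
  | zero => rfl
  | succ T ih => rw [List.range_succ, List.foldl_append, ih]; rfl

theorem getD_set_eq {α : Type} (l : List α) (i p : Nat) (v d : α) :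
    (l.set i v).getD p d = if p = i ∧ i < l.length then v else l.getD p d := by
  simp [List.getD_eq_getElem?_getD, List.getElem?_set]
  split_ifs <;> simp_all

theorem setfold_length (r : Nat) (k : Int) (d : List Int) :
    ((List.range r).foldl (fun d i => d.set i k) d).length = d.length := by
  induction r with
  | zero => rfl
  | succ r ih => rw [List.range_succ, List.foldl_append]; simp [ih]

theorem setfold_getD (r : Nat) (k : Int) (d : List Int) (p : Nat) :
    ((List.range r).foldl (fun d i => d.set i k) d).getD p 0 =
      if p < r ∧ p < d.length then k else d.getD p 0 := by
  induction r with
  | zero => simp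
  | succ r ih =>
    rw [List.range_succ, List.foldl_append]
    simp only [List.foldl_cons, List.foldl_nil]
    rw [getD_set_eq, setfold_length, ih]
    split_ifs <;> first | rfl | omega

theorem getD_rep_append (a b p : Nat) :
    (List.replicate a true ++ List.replicate b false).getD p false = decide (p < a) := by
  rcases Nat.lt_or_ge p a with h | h
  · rw [List.getD_append _ _ _ _ (by simpa using h)]; simp [h]
  · have h' : (List.replicate a true).length ≤ p := by simpa using h
    simp only [List.getD_eq_getElem?_getD, List.getElem?_append_right h', List.getElem?_replicate]
    split <;> simp [show ¬ p < a by omega]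

-- ---- step normal forms ----
theorem match_best_eq_omax (b : Option Int) (v : Int) :
    (match b with | none => some v | some b' => if v > b' then some v else some b') = omaxI b v := by
  cases b with
  | none => rfl
  | some b' => simp only [omaxI]; split_ifs <;> simp <;> omega

theorem stepO_isSome (b o : Option Int) : (stepO b o).isSome = (b.isSome || o.isSome) := by
  cases o <;> cases b <;> simp [stepO, omaxI]

theorem relC_step (b : Option Int) (x : Int) (o : Option Int) (h : RelC b x) :
    RelC (stepO b o) (stepM x o) := by
  cases o with
  | none => exact h
  | some v =>
    cases b with
    | none => simp_all only [RelC, stepO, omaxI, stepM]; omega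
    | some b' => simp_all only [RelC, stepO, omaxI, stepM]; omega

theorem relE_step (b : Option Int) (x : Int) (o : Option Int) (h : RelE b x) :
    RelE (stepO b o) (stepM x o) := by
  cases o with
  | none => exact h
  | some v => rw [RelE] at h; subst h; simp [RelE, stepO, omaxI, stepM]

-- ---- fold relations over an index list ----
theorem foldl_max_filterMap (l : List Nat) (f : Nat → Option Int) (x : Int) :
    (l.filterMap f).foldl max x = l.foldl (fun x j => stepM x (f j)) x := by
  induction l generalizing x with
  | nil => rfl
  | cons a l ih => cases h : f a <;> simp [h, ih, stepM]

theorem fold_isSome (FBf : Nat → Option Int) (l : List Nat) (b : Option Int) :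
    (l.foldl (fun b j => stepO b (FBf j)) b).isSome = (b.isSome || l.any (fun j => (FBf j).isSome)) := by
  induction l generalizing b with
  | nil => simp
  | cons a l ih => simp [ih, stepO_isSome, Bool.or_assoc]

theorem fold_rel_C (FA FBf : Nat → Option Int) (cf : Nat → Int → Int) (l : List Nat) :
    ∀ (b : Option Int) (x : Int),
    (∀ j ∈ l, FA j = (FBf j).map (cf j)) → (∀ j ∈ l, ∀ w, cf j w = w ∨ cf j w = max w 0) →
    RelC b x →
    RelC (l.foldl (fun b j => stepO b (FBf j)) b) (l.foldl (fun x j => stepM x (FA j)) x) := by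
  induction l with
  | nil => intro b x _ _ h; exact h
  | cons a l ih =>
    intro b x hFA hcf h
    simp only [List.foldl_cons]
    apply ih _ _ (fun j hj => hFA j (List.mem_cons_of_mem _ hj)) (fun j hj => hcf j (List.mem_cons_of_mem _ hj))
    rw [hFA a (List.mem_cons_self ..)]
    cases hb : FBf a with
    | none => exact h
    | some w =>
      rcases hcf a (List.mem_cons_self ..) w with hc | hc <;>
        cases b <;> simp_all only [RelC, stepO, stepM, omaxI, Option.map_some] <;> omega

theorem fold_rel_E (FA FBf : Nat → Option Int) (l : List Nat) :
    ∀ (b : Option Int) (x : Int),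
    (∀ j ∈ l, FA j = FBf j) → RelE b x →
    RelE (l.foldl (fun b j => stepO b (FBf j)) b) (l.foldl (fun x j => stepM x (FA j)) x) := by
  induction l with
  | nil => intro b x _ h; exact h
  | cons a l ih =>
    intro b x hFA h
    simp only [List.foldl_cons]
    apply ih _ _ (fun j hj => hFA j (List.mem_cons_of_mem _ hj))
    rw [hFA a (List.mem_cons_self ..)]
    exact relE_step b x (FBf a) h

theorem logB_iff {L : List Char} {j : Nat} :
    logB L j = true ↔ (L.getD j ' ' ≠ 'W' ∧ L.getD j ' ' ≠ 'C') := by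
  simp only [logB, Bool.and_eq_true, Bool.not_eq_true', beq_eq_false_iff_ne, ne_eq]

-- ---- the bridge: A's partial aggregates at cell t against B's cell value ----
theorem bridge (n m k : Int) (L : List Char) (hm : 1 ≤ m) (t : Nat) (ht : (t:Int) ≤ n) :
    dpPart n m k L t t = (match gB m k L t with | some w => clampA m t w | none => 0)
    ∧ rchPart n m k L t t = (gB m k L t).isSome := by
  have hn : 0 ≤ n := le_trans (by omega) ht
  rcases Nat.eq_zero_or_pos t with ht0 | ht1
  · subst ht0
    have hg0 : gB m k L 0 = some k := by
      simp only [gB, cellB]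
      rw [PySem.List.pyRange_one_eq_nil (by omega)]
      simp
      all_goals omega
    rw [hg0]
    constructor
    · unfold dpPart clist ainit
      simp only [List.range_zero, List.filterMap_nil, List.foldl_nil]
      rw [if_pos (by push_cast; omega), show clampA m 0 k = k from if_pos (by omega)]
    · unfold rchPart
      simp only [List.range_zero, List.any_nil, Bool.or_false, Option.isSome_some]
      simp; omega
  -- t ≥ 1
  set lo := (max 0 ((t:Int) - m)).toNat with hlo
  have hlot : lo ≤ t - 1 := by omega
  have hrange : PySem.List.pyRange (max 0 ((t:Int) - m)) (t:Int) 1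
      = (List.range (t - lo)).map (fun (kk : Nat) => max 0 ((t:Int) - m) + (kk:Int)) := by
    rw [PySem.List.pyRange_one, show ((t:Int) - max 0 ((t:Int) - m)).toNat = t - lo by omega]
  have hfold : ∀ b : Option Int,
      (PySem.List.pyRange (max 0 ((t:Int) - m)) (t:Int) 1).foldl (fun best j =>
        match (bdp m k L t).getD j.toNat none with
        | none => best
        | some v =>
          if L.getD j.toNat ' ' ≠ 'W' ∧ L.getD j.toNat ' ' ≠ 'C' then
            match best with
            | none => some v
            | some b => if v > b then some v else some b
          else best) b
      = (List.range (t - lo)).foldl (fun b kk => stepO b (FBc m k L (lo + kk))) b := by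
    intro b
    rw [hrange, List.foldl_map]
    apply PySem.List.foldl_congr_mem
    intro acc kk hkk
    have hkk' : kk < t - lo := List.mem_range.mp hkk
    rw [show (max 0 ((t:Int) - m) + (kk:Int)).toNat = lo + kk by omega,
        bdp_getD _ _ _ (by omega : lo + kk < t)]
    cases hgj : gB m k L (lo + kk) with
    | none => simp [FBc, hgj, stepO]
    | some v =>
      simp only []
      by_cases hl : logB L (lo + kk) = true
      · rw [if_pos (logB_iff.mp hl), match_best_eq_omax]
        simp [FBc, hgj, hl, stepO]
      · rw [if_neg (fun hc => hl (logB_iff.mpr hc))]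
        simp [FBc, hgj, hl, stepO]
  have hsplitA : List.range t = List.range lo ++ (List.range (t - lo)).map (fun kk => lo + kk) := by
    conv_lhs => rw [show t = lo + (t - lo) by omega]
    exact List.range_add
  have hlowzero : ∀ j ∈ List.range lo, contrib n m k L j t = none := by
    intro j hj
    have hj' : j < lo := List.mem_range.mp hj
    unfold contrib
    cases hgj : gB m k L j with
    | none => rfl
    | some w =>
      simp only []
      by_cases hl : logB L j = true
      · rw [if_pos hl, if_neg (by omega)]
      · rw [if_neg (by simp [hl])]
        split_ifs <;> first | rfl | omega
  have hclist : clist n m k L t t = (List.range (t - lo)).filterMap (fun kk => contrib n m k L (lo + kk) t) := by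
    unfold clist
    rw [hsplitA, List.filterMap_append, List.filterMap_map,
        List.filterMap_eq_nil_iff.mpr hlowzero]
    simp
  have hanyA : (List.range t).any (fun j => (contrib n m k L j t).isSome)
      = (List.range (t - lo)).any (fun kk => (contrib n m k L (lo + kk) t).isSome) := by
    rw [hsplitA, List.any_append, List.any_map]
    have hz : (List.range lo).any (fun j => (contrib n m k L j t).isSome) = false := by
      rw [List.any_eq_false]
      intro j hj; rw [hlowzero j hj]; simp
    simp [hz, Function.comp_def]
  have hdpfold : dpPart n m k L t t
      = (List.range (t - lo)).foldl (fun x kk => stepM x (contrib n m k L (lo + kk) t)) (ainit n m k t) := by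
    unfold dpPart
    rw [hclist, foldl_max_filterMap]
  have hfa' : ∀ kk, lo + kk < t - 1 →
      contrib n m k L (lo + kk) t = (FBc m k L (lo + kk)).map (fun w => clampA m (lo + kk) w) := by
    intro kk hkk
    unfold contrib FBc
    cases hgj : gB m k L (lo + kk) with
    | none => rfl
    | some w =>
      simp only []
      by_cases hl : logB L (lo + kk) = true
      · rw [if_pos hl, if_pos ⟨by omega, by omega, ht⟩, hl]
        simp
      · have hl' : logB L (lo + kk) = false := by revert hl; cases logB L (lo + kk) <;> simp
        rw [if_neg (by simp [hl']), hl']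
        simp only [Bool.false_eq_true, if_false, Option.map_none]
        split_ifs <;> first | rfl | omega
  have hcf : ∀ (j : Nat) (w : Int), clampA m j w = w ∨ clampA m j w = max w 0 := by
    intro j w; unfold clampA; split_ifs <;> [left; right] <;> rfl
  have hlast : t - lo = (t - 1 - lo) + 1 := by omega
  have hlastidx : lo + (t - 1 - lo) = t - 1 := by omega
  have hfa1 : ∀ kk ∈ List.range (t - 1 - lo),
      contrib n m k L (lo + kk) t = (FBc m k L (lo + kk)).map (fun w => clampA m (lo + kk) w) := by
    intro kk hkk; exact hfa' kk (by have := List.mem_range.mp hkk; omega)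
  have hgB1 : (bdp m k L t).getD (t - 1) none = gB m k L (t - 1) := bdp_getD _ _ _ (by omega)
  have hcellt : gB m k L t =
      (if L.getD (t-1) ' ' = 'W' then
        match gB m k L (t - 1) with
        | some v => if v > 0 then
            (match (List.range (t - lo)).foldl (fun b kk => stepO b (FBc m k L (lo + kk)))
                (if (t:Int) < m then some k else none) with
            | none => some (v-1)
            | some b => if v - 1 > b then some (v-1) else some b)
          else (List.range (t - lo)).foldl (fun b kk => stepO b (FBc m k L (lo + kk)))
                (if (t:Int) < m then some k else none)
        | none => (List.range (t - lo)).foldl (fun b kk => stepO b (FBc m k L (lo + kk)))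
                (if (t:Int) < m then some k else none)
      else (List.range (t - lo)).foldl (fun b kk => stepO b (FBc m k L (lo + kk)))
                (if (t:Int) < m then some k else none)) := by
    simp only [gB, cellB]
    rw [hfold, if_pos ht1, hgB1]
    rfl
  have hcand : L.getD (t-1) ' ' = 'W' →
      contrib n m k L (t-1) t = (match gB m k L (t - 1) with
        | some v => if v > 0 then some (v - 1) else none
        | none => none) := by
    intro hw
    unfold contrib
    cases hgv : gB m k L (t-1) with
    | none => rfl
    | some v =>
      simp only []
      rw [show logB L (t-1) = false by simp only [logB]; rw [hw]; rfl]
      rw [if_neg (by simp), if_pos hw]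
      by_cases hv : v > 0
      · have h1 : clampA m (t-1) v = v := by unfold clampA; split_ifs <;> omega
        rw [h1, if_pos ⟨by omega, hv⟩, if_pos hv]
      · have h1 : ¬ (t = t-1+1 ∧ clampA m (t-1) v > 0) := by
          rintro ⟨-, hgt0⟩; revert hgt0; unfold clampA; split_ifs <;> omega
        rw [if_neg h1, if_neg hv]
  by_cases hw : L.getD (t-1) ' ' = 'W'
  case neg =>
    have hfa : ∀ kk ∈ List.range (t - lo),
        contrib n m k L (lo + kk) t = (FBc m k L (lo + kk)).map (fun w => clampA m (lo + kk) w) := by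
      intro kk hkk
      have hkk' : kk < t - lo := List.mem_range.mp hkk
      rcases Nat.lt_or_ge (lo + kk) (t - 1) with h | h
      · exact hfa' kk h
      · have hj : lo + kk = t - 1 := by omega
        unfold contrib FBc
        cases hgj : gB m k L (lo + kk) with
        | none => rfl
        | some w =>
          simp only []
          by_cases hl : logB L (lo + kk) = true
          · rw [if_pos hl, if_pos ⟨by omega, by omega, ht⟩, hl]
            simp
          · have hl' : logB L (lo + kk) = false := by revert hl; cases logB L (lo + kk) <;> simp
            rw [if_neg (by simp [hl']), if_neg (by rw [hj]; exact hw), hl']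
            simp
    have hgt : gB m k L t = (List.range (t - lo)).foldl (fun b kk => stepO b (FBc m k L (lo + kk)))
        (if (t:Int) < m then some k else none) := by rw [hcellt, if_neg hw]
    by_cases htm : (t:Int) < m
    · have hainit : ainit n m k t = k := by unfold ainit; rw [if_pos (by omega)]
      have hrel := fold_rel_E (fun kk => contrib n m k L (lo + kk) t) (fun kk => FBc m k L (lo + kk))
        (List.range (t - lo)) (if (t:Int) < m then some k else none) (ainit n m k t)
        (by
          intro kk hkk
          show contrib n m k L (lo + kk) t = FBc m k L (lo + kk)
          have hkk' : kk < t - lo := List.mem_range.mp hkk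
          rw [hfa kk hkk]
          cases hfb : FBc m k L (lo + kk) with
          | none => rfl
          | some w => simp [show clampA m (lo + kk) w = w from if_pos (by omega)])
        (by rw [if_pos htm, hainit]; rfl)
      beta_reduce at hrel
      unfold RelE at hrel
      constructor
      · rw [hdpfold, hgt, hrel]
        show _ = clampA m t _
        unfold clampA
        rw [if_pos htm]
      · rw [hgt, hrel]
        unfold rchPart
        rw [decide_eq_true (by omega : ((t:Nat):Int) < min (n+1) m)]
        simp
    · have hainit : ainit n m k t = 0 := by unfold ainit; rw [if_neg (by omega)]
      have hrel := fold_rel_C (fun kk => contrib n m k L (lo + kk) t) (fun kk => FBc m k L (lo + kk))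
        (fun kk w => clampA m (lo + kk) w) (List.range (t - lo))
        (if (t:Int) < m then some k else none) (ainit n m k t)
        hfa (fun kk _ w => hcf (lo + kk) w)
        (by rw [if_neg htm, hainit]; rfl)
      beta_reduce at hrel
      constructor
      · rw [hdpfold, hgt]
        cases hfin : (List.range (t - lo)).foldl (fun b kk => stepO b (FBc m k L (lo + kk)))
            (if (t:Int) < m then some k else none) with
        | none => rw [hfin] at hrel; exact hrel
        | some v =>
          rw [hfin] at hrel
          show _ = clampA m t v
          unfold clampA
          rw [if_neg htm]
          exact hrel
      · rw [hgt, fold_isSome, if_neg htm]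
        unfold rchPart
        rw [decide_eq_false (by omega : ¬ ((t:Nat):Int) < min (n+1) m), hanyA]
        simp only [Option.isSome_none, Bool.false_or]
        apply PySem.List.any_congr_mem
        intro kk hkk
        rw [hfa kk hkk]
        cases FBc m k L (lo + kk) <;> simp
  case pos =>
    have hfbl : FBc m k L (t - 1) = none := by
      unfold FBc
      cases gB m k L (t - 1) with
      | none => rfl
      | some w =>
        simp only []
        rw [show logB L (t-1) = false by simp only [logB]; rw [hw]; rfl]
        simp
    have hBsplit : ∀ b₀ : Option Int,
        (List.range (t - lo)).foldl (fun b kk => stepO b (FBc m k L (lo + kk))) b₀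
        = (List.range (t - 1 - lo)).foldl (fun b kk => stepO b (FBc m k L (lo + kk))) b₀ := by
      intro b₀
      rw [hlast, List.range_succ, List.foldl_append]
      simp only [List.foldl_cons, List.foldl_nil, hlastidx, hfbl]
      rfl
    have hAsplit : (List.range (t - lo)).foldl (fun x kk => stepM x (contrib n m k L (lo + kk) t)) (ainit n m k t)
        = stepM ((List.range (t - 1 - lo)).foldl (fun x kk => stepM x (contrib n m k L (lo + kk) t)) (ainit n m k t))
            (contrib n m k L (t-1) t) := by
      rw [hlast, List.range_succ, List.foldl_append]
      simp only [List.foldl_cons, List.foldl_nil, hlastidx]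
    have hgt : gB m k L t = stepO ((List.range (t - 1 - lo)).foldl (fun b kk => stepO b (FBc m k L (lo + kk)))
        (if (t:Int) < m then some k else none)) (contrib n m k L (t-1) t) := by
      rw [hcellt, if_pos hw, hcand hw]
      cases hgv : gB m k L (t - 1) with
      | none => rw [hBsplit]; rfl
      | some v =>
        simp only []
        by_cases hv : v > 0
        · simp only [if_pos hv, match_best_eq_omax]
          rw [hBsplit]
          rfl
        · simp only [if_neg hv]
          rw [hBsplit]
          rfl
    by_cases htm : (t:Int) < m
    · have hainit : ainit n m k t = k := by unfold ainit; rw [if_pos (by omega)]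
      have hrel := fold_rel_E (fun kk => contrib n m k L (lo + kk) t) (fun kk => FBc m k L (lo + kk))
        (List.range (t - 1 - lo)) (if (t:Int) < m then some k else none) (ainit n m k t)
        (by
          intro kk hkk
          show contrib n m k L (lo + kk) t = FBc m k L (lo + kk)
          have hkk' : kk < t - 1 - lo := List.mem_range.mp hkk
          rw [hfa1 kk hkk]
          cases hfb : FBc m k L (lo + kk) with
          | none => rfl
          | some w => simp [show clampA m (lo + kk) w = w from if_pos (by omega)])
        (by rw [if_pos htm, hainit]; rfl)
      beta_reduce at hrel
      have hrel2 := relE_step _ _ (contrib n m k L (t-1) t) hrel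
      unfold RelE at hrel2
      constructor
      · rw [hdpfold, hAsplit, hgt, hrel2]
        show _ = clampA m t _
        unfold clampA
        rw [if_pos htm]
      · rw [hgt, hrel2]
        unfold rchPart
        rw [decide_eq_true (by omega : ((t:Nat):Int) < min (n+1) m)]
        simp
    · have hainit : ainit n m k t = 0 := by unfold ainit; rw [if_neg (by omega)]
      have hrel := fold_rel_C (fun kk => contrib n m k L (lo + kk) t) (fun kk => FBc m k L (lo + kk))
        (fun kk w => clampA m (lo + kk) w) (List.range (t - 1 - lo))
        (if (t:Int) < m then some k else none) (ainit n m k t)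
        hfa1 (fun kk _ w => hcf (lo + kk) w)
        (by rw [if_neg htm, hainit]; rfl)
      beta_reduce at hrel
      have hrel2 := relC_step _ _ (contrib n m k L (t-1) t) hrel
      constructor
      · rw [hdpfold, hAsplit, hgt]
        cases hfin : stepO ((List.range (t - 1 - lo)).foldl (fun b kk => stepO b (FBc m k L (lo + kk)))
            (if (t:Int) < m then some k else none)) (contrib n m k L (t-1) t) with
        | none => rw [hfin] at hrel2; exact hrel2
        | some v =>
          rw [hfin] at hrel2
          show _ = clampA m t v
          unfold clampA
          rw [if_neg htm]
          exact hrel2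
      · rw [hgt, stepO_isSome, fold_isSome, if_neg htm]
        unfold rchPart
        rw [decide_eq_false (by omega : ¬ ((t:Nat):Int) < min (n+1) m), hanyA]
        simp only [Option.isSome_none, Bool.false_or]
        rw [hlast, List.range_succ, List.any_append]
        simp only [List.any_cons, List.any_nil, Bool.or_false, hlastidx]
        congr 1
        apply PySem.List.any_congr_mem
        intro kk hkk
        rw [hfa1 kk hkk]
        cases FBc m k L (lo + kk) <;> simp

-- ---- A-side loop lemmas ----
theorem dpPart_succ (n m k : Int) (L : List Char) (t p : Nat) :
    dpPart n m k L (t+1) p = stepM (dpPart n m k L t p) (contrib n m k L t p) := by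
  unfold dpPart clist
  rw [List.range_succ, List.filterMap_append, List.foldl_append]
  cases h : contrib n m k L t p <;> simp [h, stepM]

theorem rchPart_succ (n m k : Int) (L : List Char) (t p : Nat) :
    rchPart n m k L (t+1) p = (rchPart n m k L t p || (contrib n m k L t p).isSome) := by
  unfold rchPart
  rw [List.range_succ, List.any_append]
  simp [Bool.or_assoc]

theorem jumpfold (n : Int) (t : Nat) (hn : 0 ≤ n) :
    ∀ (r : Nat) (dp : List Int) (rc : List Bool),
    dp.length = n.toNat + 1 → rc.length = n.toNat + 1 →
    let res := (List.range r).foldl (fun (s' : List Int × List Bool) (j : Nat) =>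
      if (t:Int) + 1 + (j:Int) ≤ n then
        (s'.1.set (t+1+j) (max (s'.1.getD (t+1+j) 0) (s'.1.getD t 0)), s'.2.set (t+1+j) true)
      else s') (dp, rc)
    res.1.length = dp.length ∧ res.2.length = rc.length ∧
    (∀ p, res.1.getD p 0 = (if t < p ∧ p ≤ t + r ∧ (p:Int) ≤ n then max (dp.getD p 0) (dp.getD t 0) else dp.getD p 0)) ∧
    (∀ p, res.2.getD p false = (if t < p ∧ p ≤ t + r ∧ (p:Int) ≤ n then true else rc.getD p false)) := by
  intro r
  induction r with
  | zero =>
    intro dp rc h1 h2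
    refine ⟨rfl, rfl, ?_, ?_⟩ <;> intro p <;> rw [if_neg (by omega)] <;> simp
  | succ r ih =>
    intro dp rc h1 h2
    obtain ⟨q1, q2, q3, q4⟩ := ih dp rc h1 h2
    rw [List.range_succ, List.foldl_append]
    simp only [List.foldl_cons, List.foldl_nil]
    by_cases hc : (t:Int) + 1 + (r:Int) ≤ n
    · rw [if_pos hc]
      have hlt : t + 1 + r < n.toNat + 1 := by omega
      have hv1 := (q3 (t+1+r)).trans (if_neg (by omega))
      have hvt := (q3 t).trans (if_neg (by omega))
      refine ⟨by simpa using q1, by simpa using q2, ?_, ?_⟩ <;> intro p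
      · show (_root_.List.set _ _ _).getD p 0 = _
        rw [getD_set_eq, hv1, hvt, q1, h1]
        by_cases hp : p = t + 1 + r
        · subst hp
          rw [if_pos ⟨rfl, hlt⟩, if_pos (by omega)]
        · rw [if_neg (by simp [hp]), q3]
          split_ifs <;> first | rfl | omega
      · show (_root_.List.set _ _ _).getD p false = _
        rw [getD_set_eq, q2, h2]
        by_cases hp : p = t + 1 + r
        · subst hp
          rw [if_pos ⟨rfl, hlt⟩, if_pos (by omega)]
        · rw [if_neg (by simp [hp]), q4]
          split_ifs <;> first | rfl | omega
    · rw [if_neg hc]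
      refine ⟨q1, q2, ?_, ?_⟩ <;> intro p
      · rw [q3]; split_ifs <;> first | rfl | omega
      · rw [q4]; split_ifs <;> first | rfl | omega

theorem step_preserve (n m k : Int) (L : List Char) (hm : 1 ≤ m) (hn : 0 ≤ n) (t : Nat)
    (ht : (t:Int) < n) (s : List Int × List Bool)
    (h1 : s.1.length = n.toNat + 1) (h2 : s.2.length = n.toNat + 1)
    (hp : ∀ p, s.1.getD p 0 = dpPart n m k L t p ∧ s.2.getD p false = rchPart n m k L t p) :
    (solveStep n m L s t).1.length = n.toNat + 1 ∧ (solveStep n m L s t).2.length = n.toNat + 1 ∧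
    ∀ p, (solveStep n m L s t).1.getD p 0 = dpPart n m k L (t+1) p ∧
         (solveStep n m L s t).2.getD p false = rchPart n m k L (t+1) p := by
  obtain ⟨hbd, hbr⟩ := bridge n m k L hm t (le_of_lt ht)
  have hreach : s.2.getD t false = (gB m k L t).isSome := (hp t).2.trans hbr
  cases hg : gB m k L t with
  | none =>
    have hcon : ∀ p, contrib n m k L t p = none := by
      intro p; unfold contrib; rw [hg]
    have hskip : solveStep n m L s t = s := by
      unfold solveStep; rw [if_pos (by rw [hreach, hg]; rfl)]
    rw [hskip]
    refine ⟨h1, h2, fun p => ⟨?_, ?_⟩⟩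
    · rw [dpPart_succ, hcon, (hp p).1]; rfl
    · rw [rchPart_succ, hcon, (hp p).2]; simp
  | some w =>
    rw [hg] at hbd
    have hv : s.1.getD t 0 = clampA m t w := (hp t).1.trans hbd
    have hcnd : ¬ (s.2.getD t false = false) := by rw [hreach, hg]; simp
    by_cases hcW : L.getD t ' ' = 'W'
    · have hcon : ∀ p, contrib n m k L t p =
          if p = t+1 ∧ clampA m t w > 0 then some (clampA m t w - 1) else none := by
        intro p; unfold contrib
        rw [hg, show logB L t = false by simp only [logB]; rw [hcW]; rfl]
        simp only [hcW]
        simp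
      by_cases hpos : s.1.getD t 0 > 0
      · have hstep : solveStep n m L s t =
            (s.1.set (t+1) (max (s.1.getD (t+1) 0) (s.1.getD t 0 - 1)), s.2.set (t+1) true) := by
          unfold solveStep; rw [if_neg hcnd, if_pos hcW, if_pos hpos]
        have hpos' : clampA m t w > 0 := by rw [← hv]; exact hpos
        have hlt : t + 1 < n.toNat + 1 := by omega
        rw [hstep]
        refine ⟨by simpa using h1, by simpa using h2, fun p => ⟨?_, ?_⟩⟩
        · show (_root_.List.set _ _ _).getD p 0 = _
          rw [getD_set_eq, dpPart_succ, hcon, h1]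
          by_cases hp' : p = t + 1
          · subst hp'
            rw [if_pos ⟨rfl, hlt⟩, if_pos ⟨rfl, hpos'⟩, (hp (t+1)).1, hv]
            simp [stepM]
          · rw [if_neg (by simp [hp']), if_neg (by simp [hp']), (hp p).1]; rfl
        · show (_root_.List.set _ _ _).getD p false = _
          rw [getD_set_eq, rchPart_succ, hcon, h2]
          by_cases hp' : p = t + 1
          · subst hp'
            rw [if_pos ⟨rfl, hlt⟩, if_pos ⟨rfl, hpos'⟩]
            simp
          · rw [if_neg (by simp [hp']), if_neg (by simp [hp']), (hp p).2]
            simp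
      · have hstep : solveStep n m L s t = s := by
          unfold solveStep; rw [if_neg hcnd, if_pos hcW, if_neg hpos]
        have hpos' : ¬ (clampA m t w > 0) := by rw [← hv]; exact hpos
        have hcon' : ∀ p, contrib n m k L t p = none := by
          intro p; rw [hcon p, if_neg (by tauto)]
        rw [hstep]
        refine ⟨h1, h2, fun p => ⟨?_, ?_⟩⟩
        · rw [dpPart_succ, hcon', (hp p).1]; rfl
        · rw [rchPart_succ, hcon', (hp p).2]; simp
    · by_cases hcC : L.getD t ' ' = 'C'
      · have hcon : ∀ p, contrib n m k L t p = none := by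
          intro p; unfold contrib
          rw [hg, show logB L t = false by simp only [logB]; rw [hcC]; rfl]
          simp only [hcC]
          simp
        have hstep : solveStep n m L s t = s := by
          unfold solveStep; rw [if_neg hcnd, if_neg hcW, if_pos hcC]
        rw [hstep]
        refine ⟨h1, h2, fun p => ⟨?_, ?_⟩⟩
        · rw [dpPart_succ, hcon, (hp p).1]; rfl
        · rw [rchPart_succ, hcon, (hp p).2]; simp
      · have hlog : logB L t = true := by
          simp only [logB, Bool.and_eq_true, Bool.not_eq_true', beq_eq_false_iff_ne, ne_eq]
          exact ⟨hcW, hcC⟩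
        have hcon : ∀ p, contrib n m k L t p =
            if t < p ∧ (p:Int) ≤ (t:Int) + m ∧ (p:Int) ≤ n then some (clampA m t w) else none := by
          intro p; unfold contrib; rw [hg]; simp [hlog]
        have hstep : solveStep n m L s t =
            (List.range m.toNat).foldl (fun (s' : List Int × List Bool) (j : Nat) =>
              if (t:Int) + 1 + (j:Int) ≤ n then
                (s'.1.set (t+1+j) (max (s'.1.getD (t+1+j) 0) (s'.1.getD t 0)), s'.2.set (t+1+j) true)
              else s') s := by
          unfold solveStep; rw [if_neg hcnd, if_neg hcW, if_neg hcC]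
        obtain ⟨j1, j2, j3, j4⟩ := jumpfold n t hn m.toNat s.1 s.2 h1 h2
        rw [hstep]
        have hmn : ((m.toNat : Int)) = m := by omega
        refine ⟨by rw [← h1]; exact j1, by rw [← h2]; exact j2, fun p => ⟨?_, ?_⟩⟩
        · rw [show ((List.range m.toNat).foldl _ s) = ((List.range m.toNat).foldl _ (s.1, s.2)) by rfl] at *
          rw [j3 p, dpPart_succ, hcon, (hp p).1]
          by_cases hcd : t < p ∧ (p:Int) ≤ (t:Int) + m ∧ (p:Int) ≤ n
          · rw [if_pos hcd, if_pos (by omega), hv]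
            simp [stepM]
          · rw [if_neg hcd, if_neg (by omega)]
            simp [stepM]
        · rw [show ((List.range m.toNat).foldl _ s) = ((List.range m.toNat).foldl _ (s.1, s.2)) by rfl] at *
          rw [j4 p, rchPart_succ, hcon, (hp p).2]
          by_cases hcd : t < p ∧ (p:Int) ≤ (t:Int) + m ∧ (p:Int) ≤ n
          · rw [if_pos hcd, if_pos (by omega)]
            simp
          · rw [if_neg hcd, if_neg (by omega)]
            simp

theorem ainv (n m k : Int) (L : List Char) (hm : 1 ≤ m) (hn : 0 ≤ n) :
    ∀ (t : Nat), (t:Int) ≤ n →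
    let s := (List.range t).foldl (solveStep n m L)
      ((List.range (min (n+1) m).toNat).foldl (fun d i => d.set i k) (List.replicate (n+1).toNat 0),
       List.replicate (min (n+1) m).toNat true ++ List.replicate ((n+1) - min (n+1) m).toNat false)
    s.1.length = n.toNat + 1 ∧ s.2.length = n.toNat + 1 ∧
    (∀ p, s.1.getD p 0 = dpPart n m k L t p ∧ s.2.getD p false = rchPart n m k L t p) := by
  intro t
  induction t with
  | zero =>
    intro _
    have hdj0 : (0:Int) < min (n+1) m := by omega
    have hdjle : (min (n+1) m).toNat ≤ n.toNat + 1 := by omega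
    simp only [List.range_zero, List.foldl_nil]
    refine ⟨?_, ?_, fun p => ⟨?_, ?_⟩⟩
    · rw [setfold_length]; simp; omega
    · simp only [List.length_append, List.length_replicate]; omega
    · rw [setfold_getD]
      unfold dpPart clist ainit
      simp only [List.range_zero, List.filterMap_nil, List.foldl_nil, List.length_replicate]
      split_ifs <;> first | rfl | omega | simp
    · rw [getD_rep_append]
      unfold rchPart
      simp only [List.range_zero, List.any_nil, Bool.or_false]
      by_cases hp : p < (min (n+1) m).toNat
      · simp [hp]; omega
      · simp [hp]; omega
  | succ t ih =>
    intro h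
    have htn : (t:Int) < n := by push_cast at h; omega
    obtain ⟨l1, l2, hp⟩ := ih (by omega)
    rw [List.range_succ, List.foldl_append]
    simp only [List.foldl_cons, List.foldl_nil]
    exact step_preserve n m k L hm hn t htn _ l1 l2 hp

-- ---- m ≤ 0 ----
theorem foldl_skip (n m : Int) (L : List Char) (l : List Nat) (s : List Int × List Bool)
    (h : ∀ i, s.2.getD i false = false) : l.foldl (solveStep n m L) s = s := by
  induction l with
  | nil => rfl
  | cons a l ih => simp only [List.foldl_cons, solveStep, h a, if_pos]; exact ih

theorem gB_none_of_m_nonpos (m k : Int) (L : List Char) (hm : m ≤ 0) (t : Nat) :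
    gB m k L t = none := by
  induction t with
  | zero =>
    simp only [gB, cellB]
    rw [PySem.List.pyRange_one_eq_nil (by omega)]
    simp only [List.foldl_nil]
    simp
    all_goals omega
  | succ t ih =>
    simp only [gB, cellB]
    rw [PySem.List.pyRange_one_eq_nil (by push_cast; omega)]
    have hd : (bdp m k L (t+1)).getD t none = none := by
      rw [bdp_getD m k L (Nat.lt_succ_self t)]; exact ih
    simp only [Nat.add_sub_cancel, hd]
    simp
    all_goals omega

theorem eq_of_m_nonpos (n m k : Int) (a : String) (hm : m ≤ 0) (hn : 0 ≤ n) :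
    solve n m k a = solve_alt n m k a := by
  have hdj : (min (n+1) m).toNat = 0 := by omega
  have hA : ∀ i : Nat, ((List.replicate (min (n+1) m).toNat true ++
      List.replicate ((n+1) - min (n+1) m).toNat false) : List Bool).getD i false = false := by
    intro i; rw [getD_rep_append]; simp [hdj]
  have hgB : (bdp m k a.toList (n+1).toNat).getD n.toNat none = none := by
    rw [bdp_getD m k a.toList (by omega : n.toNat < (n+1).toNat)]
    exact gB_none_of_m_nonpos m k a.toList hm n.toNat
  simp only [solve, solve_alt]
  rw [bfold_eq, foldl_skip n m a.toList _ _ hA, hA n.toNat, hgB]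
  rfl

theorem eq_of_m_pos (n m k : Int) (a : String) (hm : 1 ≤ m) (hn : 0 ≤ n) :
    solve n m k a = solve_alt n m k a := by
  obtain ⟨_, _, hp⟩ := ainv n m k a.toList hm hn n.toNat (by omega)
  obtain ⟨_, hbr⟩ := bridge n m k a.toList hm n.toNat (by omega)
  simp only [solve, solve_alt]
  rw [bfold_eq, bdp_getD _ _ _ (by omega : n.toNat < (n+1).toNat), (hp n.toNat).2, hbr]

-- ===== VERDICT (by name: the statement is the Claim_ definition above) =====
theorem solve_spec : Claim_equal_solve := by
  intro n m k a _hdom hpre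
  unfold Spec_solve
  rcases hpre with ⟨hn, _hlen⟩
  by_cases hm : m ≤ 0
  · exact eq_of_m_nonpos n m k a hm hn
  · exact eq_of_m_pos n m k a (by omega) hn
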